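-- pv_equiv track=rewrite | github.com/w1ll18m/Algorithm-and-Data-Structures | Two_Pointers/1968_Array_With_Elements_Not_Equal_To_Average_Of_Neighbors.py | rearrangeArray
-- ===== SOURCE A (Python) =====
-- from typing import List
--
-- def rearrangeArray(nums: List[int]) -> List[int]:
--     # sort the array
--     nums.sort()
--
--     # rearrange the array as ABABAB
--     results = []
--     i, j = 0, len(nums) - 1
--     while i < j:
--         results.append(nums[i])
--         results.append(nums[j])
--         i, j = i + 1, j - 1
--
--     if len(nums) % 2 != 0:
--         results.append(nums[i])
--
--     return results
-- ===== SOURCE B (Python) =====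
-- def rearrangeArray(nums):
--     # Scatter pass: sort, then place each sorted element directly at its final
--     # position in a preallocated output (position 2*t for the lower half,
--     # 2*n-1-2*t for the upper half), instead of gathering ends with two pointers.
--     nums.sort()
--     n = len(nums)
--     out = [0] * n
--     for t, v in enumerate(nums):
--         p = 2 * t
--         out[p if p < n else 2 * n - 1 - p] = v
--     return out
-- ===== Notes on version B (the rewrite author's own statement) =====
-- stated objective: alternative
-- what changed: Replaces A's two-pointer gather (append smallest, append largest, special-case the middle) by a scatter pass: preallocate the output and write each sorted element once at its computed final position (2t for the lower half, 2n-1-2t for the upper half), no two pointers and no odd-length special case.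
import Mathlib
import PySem

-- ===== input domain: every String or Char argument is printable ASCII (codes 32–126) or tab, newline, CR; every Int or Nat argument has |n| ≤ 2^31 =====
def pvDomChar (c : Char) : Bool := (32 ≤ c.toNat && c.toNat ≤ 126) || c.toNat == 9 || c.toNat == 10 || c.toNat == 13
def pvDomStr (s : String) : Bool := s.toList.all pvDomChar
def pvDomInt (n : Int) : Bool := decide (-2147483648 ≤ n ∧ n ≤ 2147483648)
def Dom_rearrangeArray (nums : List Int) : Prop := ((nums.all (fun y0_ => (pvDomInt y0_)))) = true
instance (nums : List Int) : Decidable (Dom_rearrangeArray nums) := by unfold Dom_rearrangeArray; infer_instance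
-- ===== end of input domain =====

-- B replaces A's two-pointer gather loop (append ends, special-case the middle) by a
-- scatter pass writing each sorted element once at its computed final position (objective: alternative).
-- NOTE: both A and B sort `nums` in place (nums.sort()); the equivalence proved
-- here is about the RETURN value (the ports are pure).

-- ===== PORT A =====
-- the while-loop of A; indices i, j are always in range on every reachable call,
-- so nums[i]/nums[j] is ported exactly by pyGetD with an irrelevant default
def rearrangeLoopA (s : List Int) (i j : Int) : List Int :=
  if i < j then
    PySem.List.pyGetD s i 0 :: PySem.List.pyGetD s j 0 :: rearrangeLoopA s (i + 1) (j - 1)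
  else if ((s.length : Int)) % 2 ≠ 0 then [PySem.List.pyGetD s i 0] else []
termination_by (j - i).toNat
decreasing_by omega

def rearrangeArray (nums : List Int) : List Int :=
  let s := PySem.List.sorted nums (fun x => x) false
  rearrangeLoopA s 0 ((s.length : Int) - 1)

-- ===== PORT B =====
-- out[p] = v with p always a nonnegative in-range index: ported exactly by pySetD
def rearrangeArray_alt (nums : List Int) : List Int :=
  let s := PySem.List.sorted nums (fun x => x) false
  let n : Int := s.length
  (PySem.List.enumerate s 0).foldl (fun out tv =>
      let p := 2 * tv.1
      PySem.List.pySetD out (if p < n then p else 2 * n - 1 - p) tv.2)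
    (List.replicate s.length 0)

-- ===== PRECONDITION & SPEC =====
def Spec_rearrangeArray (nums : List Int) (out : List Int) : Prop := out = rearrangeArray_alt nums
instance (nums : List Int) (out : List Int) : Decidable (Spec_rearrangeArray nums out) := by unfold Spec_rearrangeArray; infer_instance

-- ===== CLAIM (what is proved, stated in full; the proofs are below) =====
def Claim_equal_rearrangeArray : Prop := ∀ (nums : List Int), Dom_rearrangeArray nums → Spec_rearrangeArray nums (rearrangeArray nums)

-- ===== LEMMAS AND PROOFS =====

-- closed form for A's loop under its invariant i + j = len - 1
theorem rearrangeLoopA_eq (s : List Int) :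
    ∀ (m : Nat) (i j : Int), 0 ≤ i → i + j = (s.length : Int) - 1 → i ≤ j + 1 →
      m = (j + 1 - i).toNat →
      rearrangeLoopA s i j =
        (List.range m).map (fun k =>
          if k % 2 = 0 then PySem.List.pyGetD s (i + (k / 2 : Nat)) 0
          else PySem.List.pyGetD s (j - (k / 2 : Nat)) 0) := by
  intro m
  induction m using Nat.strong_induction_on with
  | _ m ih =>
    intro i j hi hsum hle hm
    by_cases hij : i < j
    · have hm2 : 2 ≤ m := by omega
      obtain ⟨a, rfl⟩ : ∃ a, m = a + 2 := ⟨m - 2, by omega⟩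
      rw [rearrangeLoopA, if_pos hij,
        ih a (by omega) (i + 1) (j - 1) (by omega) (by omega) (by omega) (by omega)]
      have hrange : List.range (a + 2) = 0 :: 1 :: (List.range a).map (fun k => 2 + k) := by
        rw [List.range_eq_range', List.range']
        rw [show (0:Nat) + 1 = 1 by rfl, List.range']
        rw [show (1:Nat) + 1 = 2 by rfl, List.range'_eq_map_range, List.range_eq_range']
      rw [hrange]
      simp only [List.map_cons, List.map_map]
      congr 1
      · norm_num
      congr 1
      · norm_num
      · apply List.map_congr_left
        intro k _
        simp only [Function.comp]
        have h1 : (2 + k) % 2 = k % 2 := by omega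
        have h2 : (2 + k) / 2 = k / 2 + 1 := by omega
        rw [h1, h2]
        by_cases hk : k % 2 = 0
        · rw [if_pos hk, if_pos hk]
          congr 1
          push_cast
          ring
        · rw [if_neg hk, if_neg hk]
          congr 1
          push_cast
          ring
    · rw [rearrangeLoopA, if_neg hij]
      by_cases heq : i = j
      · have hodd : ((s.length : Int)) % 2 ≠ 0 := by omega
        rw [if_pos hodd]
        have hm1 : m = 1 := by omega
        subst hm1
        simp only [List.range_one, List.map_cons, List.map_nil]
        norm_num
      · have heven : ¬ ((s.length : Int)) % 2 ≠ 0 := by omega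
        rw [if_neg heven]
        have hm0 : m = 0 := by omega
        subst hm0
        simp

-- B's scatter fold preserves the output length
theorem length_scatter (ps : List (Int × Int)) :
    ∀ (out : List Int),
      (ps.foldl (fun o pv => PySem.List.pySetD o pv.1 pv.2) out).length = out.length := by
  induction ps with
  | nil => intro out; rfl
  | cons pv rest ih =>
    intro out
    simp only [List.foldl_cons, ih, PySem.List.length_pySetD]

-- element-wise reading of a scatter fold with pairwise-distinct in-range positions
theorem getD_scatter (ps : List (Int × Int)) :
    ∀ (out : List Int) (q : Nat), q < out.length →
      ps.Pairwise (fun a b => a.1 ≠ b.1) →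
      (∀ pv ∈ ps, 0 ≤ pv.1 ∧ pv.1 < (out.length : Int)) →
      (ps.foldl (fun o pv => PySem.List.pySetD o pv.1 pv.2) out).getD q 0 =
        (match ps.find? (fun pv => pv.1 == (q : Int)) with
         | some pv => pv.2
         | none => out.getD q 0) := by
  induction ps with
  | nil => intro out q hq _ _; rfl
  | cons pv rest ih =>
    intro out q hq hpw hrange
    have hpvr := hrange pv (List.mem_cons_self)
    have hset : PySem.List.pySetD out pv.1 pv.2 = out.set pv.1.toNat pv.2 :=
      PySem.List.pySetD_of_nonneg out pv.2 hpvr.1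
    rw [List.foldl_cons, List.find?_cons, hset]
    have hlen : (out.set pv.1.toNat pv.2).length = out.length := List.length_set ..
    by_cases hhit : pv.1 = (q : Int)
    · have hbeq : (pv.1 == (q : Int)) = true := by simp [hhit]
      rw [hbeq]
      rw [ih _ q (by omega) hpw.of_cons
        (by intro x hx; have := hrange x (List.mem_cons_of_mem _ hx); omega)]
      have hnone : rest.find? (fun x => x.1 == (q : Int)) = none := by
        apply List.find?_eq_none.mpr
        intro x hx
        have := (List.pairwise_cons.mp hpw).1 x hx
        simp only [beq_iff_eq]
        omega
      rw [hnone]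
      have hqt : pv.1.toNat = q := by omega
      subst hqt
      rw [List.getD_eq_getElem _ _ (by omega)]
      exact List.getElem_set_self _
    · have hbeq : (pv.1 == (q : Int)) = false := by simp [hhit]
      rw [hbeq]
      rw [ih _ q (by omega) hpw.of_cons
        (by intro x hx; have := hrange x (List.mem_cons_of_mem _ hx); omega)]
      cases hfind : rest.find? (fun x => x.1 == (q : Int)) with
      | some y => rfl
      | none =>
        rw [List.getD_eq_getElem _ _ (by omega), List.getD_eq_getElem _ _ hq,
          List.getElem_set_ne (by omega)]

-- find? over enumerate with a predicate on the index only
theorem find?_enumerate (p : Int → Bool) :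
    ∀ (s : List Int) (a : Int) (t0 : Nat) (h : t0 < s.length),
      p (a + t0) = true → (∀ k : Nat, k < t0 → p (a + k) = false) →
      (PySem.List.enumerate s a).find? (fun tv => p tv.1) = some (a + t0, s[t0]) := by
  intro s
  induction s with
  | nil => intro a t0 h; simp at h
  | cons x xs ih =>
    intro a t0 h hp hlt
    rw [PySem.List.enumerate_cons, List.find?_cons]
    cases t0 with
    | zero =>
      have : p a = true := by simpa using hp
      simp [this]
    | succ t =>
      have hafalse : p (a, x).1 = false := by
        have := hlt 0 (by omega)
        simpa using this
      rw [hafalse]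
      have hrec := ih (a + 1) t (by simpa using Nat.lt_of_succ_lt_succ h)
        (by have : a + 1 + (t : Int) = a + ((t + 1 : Nat) : Int) := by push_cast; ring
            rw [this]; exact hp)
        (by intro k hk
            have hcast : a + 1 + (k : Int) = a + ((k + 1 : Nat) : Int) := by push_cast; ring
            rw [hcast]; exact hlt (k + 1) (by omega))
      show List.find? (fun tv => p tv.1) (PySem.List.enumerate xs (a + 1)) = _
      rw [hrec]
      congr 2
      push_cast; ring

-- ===== VERDICT (by name: the statement is the Claim_ definition above) =====
theorem rearrangeArray_spec : Claim_equal_rearrangeArray := by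
  intro nums _
  unfold Spec_rearrangeArray rearrangeArray rearrangeArray_alt
  dsimp only
  set s := PySem.List.sorted nums (fun x => x) false with hs
  set n : Nat := s.length with hn
  -- A's side: closed gather form
  rw [rearrangeLoopA_eq s n 0 ((n : Int) - 1) (by omega) (by omega) (by omega) (by omega)]
  -- B's side: rewrite the fold step as a plain (position, value) scatter
  have hB : (PySem.List.enumerate s 0).foldl (fun out tv =>
        PySem.List.pySetD out (if 2 * tv.1 < (n : Int) then 2 * tv.1 else 2 * (n : Int) - 1 - 2 * tv.1) tv.2)
        (List.replicate n 0) =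
      ((PySem.List.enumerate s 0).map (fun tv =>
          ((if 2 * tv.1 < (n : Int) then 2 * tv.1 else 2 * (n : Int) - 1 - 2 * tv.1), tv.2))).foldl
        (fun o pv => PySem.List.pySetD o pv.1 pv.2) (List.replicate n 0) := by
    rw [List.foldl_map]
  rw [hB]
  refine List.ext_getElem ?_ ?_
  · rw [List.length_map, List.length_range, length_scatter, List.length_replicate]
  · intro q hq1 hq2
    rw [List.length_map, List.length_range] at hq1
    -- B's element at q
    have hmem : ∀ pv ∈ (PySem.List.enumerate s 0).map (fun tv =>
        ((if 2 * tv.1 < (n : Int) then 2 * tv.1 else 2 * (n : Int) - 1 - 2 * tv.1), tv.2)),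
        0 ≤ pv.1 ∧ pv.1 < ((List.replicate n (0:Int)).length : Int) := by
      intro pv hpv
      rw [List.mem_map] at hpv
      obtain ⟨tv, htv, rfl⟩ := hpv
      rw [PySem.List.mem_enumerate_iff] at htv
      obtain ⟨k, hk, rfl⟩ := htv
      simp only [zero_add, List.length_replicate]
      split_ifs with h <;> constructor <;> omega
    have hpw : ((PySem.List.enumerate s 0).map (fun tv =>
        ((if 2 * tv.1 < (n : Int) then 2 * tv.1 else 2 * (n : Int) - 1 - 2 * tv.1), tv.2))).Pairwise
        (fun a b => a.1 ≠ b.1) := by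
      rw [List.pairwise_map]
      apply List.Pairwise.imp _ (PySem.List.pairwise_lt_enumerate s 0)
      intro a b hab
      dsimp only
      -- positions are injective: both branches are monotone and their images have opposite parity
      split_ifs with h1 h2 h2 <;> omega
    -- the first (and only) pair whose position is q
    by_cases hpar : q % 2 = 0
    · -- q even: written by t0 = q / 2
      have hfind : (PySem.List.enumerate s 0).find? (fun tv =>
          (if 2 * tv.1 < (n:Int) then 2 * tv.1 else 2 * (n:Int) - 1 - 2 * tv.1) == (q : Int)) =
          some ((0:Int) + ((q / 2 : Nat) : Int), s[q / 2]'(by omega)) := by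
        apply find?_enumerate
          (fun u => (if 2 * u < (n:Int) then 2 * u else 2 * (n:Int) - 1 - 2 * u) == (q:Int))
          s 0 (q / 2) (by omega)
        · have hlt : 2 * ((0:Int) + ((q / 2 : Nat) : Int)) < (n : Int) := by
            push_cast; omega
          rw [if_pos hlt]
          simp only [beq_iff_eq]
          push_cast
          omega
        · intro k hk
          simp only [zero_add]
          split_ifs with h <;> (rw [beq_eq_false_iff_ne]; omega)
      rw [List.getElem_map, List.getElem_range, if_pos hpar]
      have hqlen : q < (List.replicate n (0:Int)).length := by simp; omega
      have := getD_scatter _ (List.replicate n 0) q hqlen hpw hmem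
      rw [List.find?_map] at this
      have hcomp : ((fun pv : Int × Int => pv.1 == (q:Int)) ∘ (fun tv : Int × Int =>
          ((if 2 * tv.1 < (n:Int) then 2 * tv.1 else 2 * (n:Int) - 1 - 2 * tv.1), tv.2))) =
          (fun tv : Int × Int => (if 2 * tv.1 < (n:Int) then 2 * tv.1 else 2 * (n:Int) - 1 - 2 * tv.1) == (q:Int)) := by
        rfl
      rw [hcomp, hfind] at this
      refine Eq.trans ?_ (List.getD_eq_getElem _ 0 (by rw [length_scatter]; simpa using hq1)).symm.symm
      rw [this]
      rw [PySem.List.pyGetD_eq_getElem s 0 (by push_cast; omega) (by push_cast; omega)]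
      congr 1
      push_cast
      omega
    · -- q odd: written by t0 = n - 1 - q / 2
      have ht0 : n - 1 - q / 2 < n := by omega
      have hfind : (PySem.List.enumerate s 0).find? (fun tv =>
          (if 2 * tv.1 < (n:Int) then 2 * tv.1 else 2 * (n:Int) - 1 - 2 * tv.1) == (q : Int)) =
          some ((0:Int) + ((n - 1 - q / 2 : Nat) : Int), s[n - 1 - q / 2]'ht0) := by
        apply find?_enumerate
          (fun u => (if 2 * u < (n:Int) then 2 * u else 2 * (n:Int) - 1 - 2 * u) == (q:Int))
          s 0 (n - 1 - q / 2) ht0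
        · have hge : ¬ 2 * ((0:Int) + ((n - 1 - q / 2 : Nat) : Int)) < (n : Int) := by
            omega
          rw [if_neg hge]
          simp only [beq_iff_eq]
          omega
        · intro k hk
          simp only [zero_add]
          split_ifs with h <;> (rw [beq_eq_false_iff_ne]; omega)
      rw [List.getElem_map, List.getElem_range, if_neg hpar]
      have hqlen : q < (List.replicate n (0:Int)).length := by simp; omega
      have := getD_scatter _ (List.replicate n 0) q hqlen hpw hmem
      rw [List.find?_map] at this
      have hcomp : ((fun pv : Int × Int => pv.1 == (q:Int)) ∘ (fun tv : Int × Int =>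
          ((if 2 * tv.1 < (n:Int) then 2 * tv.1 else 2 * (n:Int) - 1 - 2 * tv.1), tv.2))) =
          (fun tv : Int × Int => (if 2 * tv.1 < (n:Int) then 2 * tv.1 else 2 * (n:Int) - 1 - 2 * tv.1) == (q:Int)) := by
        rfl
      rw [hcomp, hfind] at this
      refine Eq.trans ?_ (List.getD_eq_getElem _ 0 (by rw [length_scatter]; simpa using hq1)).symm.symm
      rw [this]
      rw [PySem.List.pyGetD_eq_getElem s 0 (by push_cast; omega) (by push_cast; omega)]
      congr 1
      push_cast
      omega
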